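-- pv_equiv track=rewrite | github.com/carrier1269/baekjoon | 2_silver/4779.py | mid_blank
-- ===== SOURCE A (Python) =====
-- def mid_blank(STRING):
--     if len(STRING) <= 1:
--         return STRING
--
--     left, middle, right = '','',''
--
--     for i in range(len(STRING)):
--         if i < int(len(STRING)/3):
--             left += STRING[i]
--         elif i > int(len(STRING)/3*2-1):
--             right += STRING[i]
--         else:
--             middle += " "
--
--     return mid_blank(left) + middle + mid_blank(right)
-- ===== SOURCE B (Python) =====
-- def mid_blank(STRING):
--     # Cantor blanking done in-place on one character buffer: recurse over
--     # index ranges, overwrite each middle third with spaces, join once.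
--     buf = list(STRING)
--
--     def blank(lo, hi):
--         n = hi - lo
--         if n <= 1:
--             return
--         a = lo + n // 3
--         b = lo + (2 * n) // 3
--         for i in range(a, b):
--             buf[i] = ' '
--         blank(lo, a)
--         blank(b, hi)
--
--     blank(0, len(STRING))
--     return ''.join(buf)
-- ===== Notes on version B (the rewrite author's own statement) =====
-- stated objective: faster
-- what changed: Instead of recursively building left/middle/right strings character by character and concatenating them at every recursion level, B allocates one character buffer, recurses over (lo, hi) index ranges overwriting each middle third with spaces in place, and joins once at the end.
import Mathlib
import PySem

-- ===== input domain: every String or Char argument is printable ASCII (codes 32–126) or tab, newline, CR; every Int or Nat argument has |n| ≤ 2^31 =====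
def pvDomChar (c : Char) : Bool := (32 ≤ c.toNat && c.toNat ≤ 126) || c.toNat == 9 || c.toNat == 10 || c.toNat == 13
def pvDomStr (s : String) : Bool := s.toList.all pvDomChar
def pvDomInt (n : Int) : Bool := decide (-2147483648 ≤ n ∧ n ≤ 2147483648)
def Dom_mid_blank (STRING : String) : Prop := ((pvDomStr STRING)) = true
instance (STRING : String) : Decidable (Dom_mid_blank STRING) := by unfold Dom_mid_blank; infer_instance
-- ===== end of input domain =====

-- B replaces A's recursive left/middle/right string building with in-place
-- space-marking of middle thirds in one character buffer (objective: faster).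

-- ===== PORT A =====
-- A's for-loop, building (left, middle, right).
-- Python's thresholds are int(len/3) and int(len/3*2-1) computed in FLOAT
-- arithmetic; for every achievable length (far below 2^50 characters) they
-- equal exactly n//3 and (2*n-3)//3, which is how they are ported here.
def midLoopA (s : List Char) (n : Int) :
    List Char × List Char × List Char :=
  (PySem.List.pyRange 0 n 1).foldl
    (fun acc i =>
      if i < PySem.Int.floordiv n 3 then
        (acc.1 ++ [PySem.List.pyGetD s i ' '], acc.2.1, acc.2.2)
      else if i > PySem.Int.floordiv (2 * n - 3) 3 then
        (acc.1, acc.2.1, acc.2.2 ++ [PySem.List.pyGetD s i ' '])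
      else
        (acc.1, acc.2.1 ++ [' '], acc.2.2))
    ([], [], [])

-- A's recursion; the fuel counter is only a totality guard (fuel = length of
-- the string is always sufficient, as proved below).
def midA : Nat → List Char → List Char
  | 0, s => s
  | fuel + 1, s =>
    if (s.length : Int) ≤ 1 then s
    else
      let t := midLoopA s (s.length : Int)
      midA fuel t.1 ++ t.2.1 ++ midA fuel t.2.2

def mid_blank (STRING : String) : String :=
  String.ofList (midA STRING.toList.length STRING.toList)

-- ===== PORT B =====
-- blank(lo, hi): overwrite the middle third of buf[lo:hi] with spaces and
-- recurse on the two outer thirds; the fuel counter is only a totality guard.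
def blankB : Nat → Int → Int → List Char → List Char
  | 0, _, _, buf => buf
  | fuel + 1, lo, hi, buf =>
    let n := hi - lo
    if n ≤ 1 then buf
    else
      let a := lo + PySem.Int.floordiv n 3
      let b := lo + PySem.Int.floordiv (2 * n) 3
      let buf1 := (PySem.List.pyRange a b 1).foldl
        (fun bf i => PySem.List.pySetD bf i ' ') buf
      let buf2 := blankB fuel lo a buf1
      blankB fuel b hi buf2

def mid_blank_alt (STRING : String) : String :=
  String.ofList (blankB STRING.toList.length 0 (STRING.toList.length : Int) STRING.toList)

-- ===== PRECONDITION & SPEC =====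
def Spec_mid_blank (STRING : String) (out : String) : Prop := out = mid_blank_alt STRING
instance (STRING : String) (out : String) : Decidable (Spec_mid_blank STRING out) := by unfold Spec_mid_blank; infer_instance

-- ===== CLAIM (what is proved, stated in full; the proofs are below) =====
def Claim_equal_mid_blank : Prop := ∀ (STRING : String), Dom_mid_blank STRING → Spec_mid_blank STRING (mid_blank STRING)

-- ===== LEMMAS AND PROOFS =====

-- the common mathematical shape of both programs: Cantor blanking by take/drop.
def cantor (s : List Char) : List Char :=
  if s.length ≤ 1 then s
  else
    cantor (s.take (s.length / 3)) ++
    List.replicate (2 * s.length / 3 - s.length / 3) ' ' ++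
    cantor (s.drop (2 * s.length / 3))
termination_by s.length
decreasing_by
  · simp only [List.length_take]; omega
  · simp only [List.length_drop]; omega

lemma cantor_length (s : List Char) : (cantor s).length = s.length := by
  fun_induction cantor s with
  | case1 s h => rfl
  | case2 s h ih1 ih2 =>
    simp only [List.length_append, ih1, ih2, List.length_take, List.length_drop,
      List.length_replicate]
    omega

lemma midLoopA_partial (s : List Char) (m : Nat) (h2 : 2 ≤ s.length) (hm : m ≤ s.length) :
    (PySem.List.pyRange 0 (m : Int) 1).foldl
      (fun acc i =>
        if i < PySem.Int.floordiv (s.length : Int) 3 then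
          (acc.1 ++ [PySem.List.pyGetD s i ' '], acc.2.1, acc.2.2)
        else if i > PySem.Int.floordiv (2 * (s.length : Int) - 3) 3 then
          (acc.1, acc.2.1, acc.2.2 ++ [PySem.List.pyGetD s i ' '])
        else
          (acc.1, acc.2.1 ++ [' '], acc.2.2))
      ([], [], []) =
    (s.take (min m (s.length / 3)),
     List.replicate (min m (2 * s.length / 3) - min m (s.length / 3)) ' ',
     (s.drop (2 * s.length / 3)).take (m - 2 * s.length / 3)) := by
  have hk : PySem.Int.floordiv (s.length : Int) 3 = ((s.length / 3 : Nat) : Int) := by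
    rw [PySem.Int.floordiv_eq_ediv_of_pos (by norm_num)]; omega
  have hj : PySem.Int.floordiv (2 * (s.length : Int) - 3) 3
      = ((2 * s.length / 3 : Nat) : Int) - 1 := by
    rw [PySem.Int.floordiv_eq_ediv_of_pos (by norm_num)]; omega
  induction m with
  | zero =>
    rw [show ((0 : Nat) : Int) = 0 by rfl, PySem.List.pyRange_one_eq_nil le_rfl]
    simp
  | succ m ih =>
    rw [show ((m + 1 : Nat) : Int) = (m : Int) + 1 by push_cast; ring,
      PySem.List.pyRange_one_succ_right (Int.natCast_nonneg m), List.foldl_append,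
      ih (by omega)]
    simp only [List.foldl_cons, List.foldl_nil, hk, hj]
    have hmlen : m < s.length := by omega
    have hget : PySem.List.pyGetD s (m : Int) ' ' = s[m] := by
      simp [PySem.List.pyGetD_natCast, List.getD_eq_getElem?_getD,
        List.getElem?_eq_getElem hmlen]
    by_cases h1 : m < s.length / 3
    · rw [if_pos (by exact_mod_cast h1)]
      simp only [hget, Prod.mk.injEq]
      refine ⟨?_, by congr 1; omega, by congr 1; omega⟩
      rw [min_eq_left (by omega), min_eq_left (by omega), List.take_succ,
        List.getElem?_eq_getElem hmlen]
      rfl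
    · rw [if_neg (by exact_mod_cast h1)]
      by_cases h2' : 2 * s.length / 3 ≤ m
      · rw [if_pos (by
          have : ((2 * s.length / 3 : Nat) : Int) ≤ (m : Int) := by exact_mod_cast h2'
          omega)]
        simp only [hget, Prod.mk.injEq]
        refine ⟨by congr 1; omega, by congr 1; omega, ?_⟩
        rw [show m + 1 - 2 * s.length / 3 = (m - 2 * s.length / 3) + 1 by omega,
          List.take_succ, List.getElem?_drop,
          show 2 * s.length / 3 + (m - 2 * s.length / 3) = m by omega,
          List.getElem?_eq_getElem hmlen]
        rfl
      · rw [if_neg (by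
          have : (m : Int) < ((2 * s.length / 3 : Nat) : Int) :=
            by exact_mod_cast (by omega : m < 2 * s.length / 3)
          omega)]
        simp only [Prod.mk.injEq]
        refine ⟨by congr 1; omega, ?_, by congr 1; omega⟩
        rw [show min (m + 1) (2 * s.length / 3) - min (m + 1) (s.length / 3)
              = (min m (2 * s.length / 3) - min m (s.length / 3)) + 1 by omega,
          List.replicate_succ']

lemma midLoopA_eq (s : List Char) (h : 2 ≤ s.length) :
    midLoopA s (s.length : Int) =
      (s.take (s.length / 3),
       List.replicate (2 * s.length / 3 - s.length / 3) ' ',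
       s.drop (2 * s.length / 3)) := by
  have hp := midLoopA_partial s s.length h le_rfl
  unfold midLoopA
  have h1 : min s.length (s.length / 3) = s.length / 3 := by omega
  have h2 : min s.length (2 * s.length / 3) = 2 * s.length / 3 := by omega
  have h3 : List.take (s.length - 2 * s.length / 3) (List.drop (2 * s.length / 3) s)
      = List.drop (2 * s.length / 3) s :=
    List.take_of_length_le (by simp [List.length_drop])
  rw [hp, h1, h2, h3]

lemma midA_eq_cantor (fuel : Nat) (s : List Char) (h : s.length ≤ fuel) :
    midA fuel s = cantor s := by
  induction fuel generalizing s with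
  | zero =>
    have : s = [] := List.length_eq_zero_iff.mp (by omega)
    subst this
    rw [cantor]
    simp [midA]
  | succ fuel ih =>
    by_cases h1 : s.length ≤ 1
    · simp only [midA]
      rw [if_pos (by exact_mod_cast h1), cantor, if_pos h1]
    · simp only [midA]
      rw [if_neg (by exact_mod_cast h1), midLoopA_eq s (by omega)]
      rw [ih _ (by simp only [List.length_take]; omega),
          ih _ (by simp only [List.length_drop]; omega)]
      rw [show cantor s = cantor (s.take (s.length / 3)) ++
            List.replicate (2 * s.length / 3 - s.length / 3) ' ' ++
            cantor (s.drop (2 * s.length / 3)) by rw [cantor, if_neg h1]]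

lemma setLoop_eq (d : Nat) : ∀ (buf : List Char) (a b : Nat), b = a + d → b ≤ buf.length →
    (PySem.List.pyRange (a : Int) (b : Int) 1).foldl
      (fun bf i => PySem.List.pySetD bf i ' ') buf =
    buf.take a ++ List.replicate d ' ' ++ buf.drop b := by
  induction d with
  | zero =>
    intro buf a b hb hlen
    subst hb
    rw [PySem.List.pyRange_one_eq_nil (by omega)]
    simp
  | succ d ih =>
    intro buf a b hb hlen
    have halen : a < buf.length := by omega
    rw [PySem.List.pyRange_one_cons (by exact_mod_cast (by omega : a < b)),
      List.foldl_cons]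
    simp only [PySem.List.pySetD_natCast]
    rw [show (a : Int) + 1 = ((a + 1 : Nat) : Int) by push_cast; ring,
      ih (buf.set a ' ') (a + 1) b (by omega) (by simpa using hlen)]
    rw [List.drop_set_of_lt (by omega)]
    have htake : (buf.set a ' ').take (a + 1) = buf.take a ++ [' '] := by
      rw [List.take_succ, List.take_set_of_le le_rfl,
        List.getElem?_set_self (by simpa using halen)]
      rfl
    rw [htake]
    simp [List.replicate_succ, List.append_assoc]

lemma blankB_eq (fuel : Nat) : ∀ (lo hi : Nat) (buf : List Char),
    lo ≤ hi → hi ≤ buf.length → hi - lo ≤ fuel →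
    blankB fuel (lo : Int) (hi : Int) buf =
      buf.take lo ++ cantor ((buf.drop lo).take (hi - lo)) ++ buf.drop hi := by
  induction fuel with
  | zero =>
    intro lo hi buf hlo hhi hf
    have : hi = lo := by omega
    subst this
    simp only [blankB, Nat.sub_self, List.take_zero]
    rw [cantor]
    simp
  | succ fuel ih =>
    intro lo hi buf hlo hhi hf
    have hdrop_seg : (buf.drop lo).take (hi - lo) ++ buf.drop hi = buf.drop lo := by
      rw [show buf.drop hi = (buf.drop lo).drop (hi - lo) by
        rw [List.drop_drop]; congr 1; omega]
      exact List.take_append_drop _ _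
    by_cases hsmall : hi - lo ≤ 1
    · simp only [blankB]
      rw [if_pos (by omega : (hi : Int) - (lo : Int) ≤ 1)]
      rw [show cantor ((buf.drop lo).take (hi - lo)) = (buf.drop lo).take (hi - lo) by
        rw [cantor, if_pos (by simp only [List.length_take, List.length_drop]; omega)]]
      rw [List.append_assoc, hdrop_seg, List.take_append_drop]
    · have hn2 : 2 ≤ hi - lo := by omega
      obtain ⟨A, hA⟩ : ∃ A, A = lo + (hi - lo) / 3 := ⟨_, rfl⟩
      obtain ⟨B, hB⟩ : ∃ B, B = lo + 2 * (hi - lo) / 3 := ⟨_, rfl⟩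
      simp only [blankB]
      rw [if_neg (by omega : ¬ ((hi : Int) - (lo : Int) ≤ 1))]
      have ha' : (lo : Int) + PySem.Int.floordiv ((hi : Int) - (lo : Int)) 3
          = ((A : Nat) : Int) := by
        rw [PySem.Int.floordiv_eq_ediv_of_pos (by norm_num)]; omega
      have hb' : (lo : Int) + PySem.Int.floordiv (2 * ((hi : Int) - (lo : Int))) 3
          = ((B : Nat) : Int) := by
        rw [PySem.Int.floordiv_eq_ediv_of_pos (by norm_num)]; omega
      rw [ha', hb']
      rw [setLoop_eq (B - A) buf A B (by omega) (by omega)]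
      obtain ⟨T, hT⟩ : ∃ T, T = buf.take A ++ List.replicate (B - A) ' ' ++ buf.drop B :=
        ⟨_, rfl⟩
      rw [← hT]
      have hTlen : T.length = buf.length := by
        simp only [hT, List.length_append, List.length_take, List.length_replicate,
          List.length_drop]
        omega
      rw [ih lo A T (by omega) (by omega) (by omega)]
      have hTtake : T.take lo = buf.take lo := by
        rw [hT, List.append_assoc, List.take_append_of_le_length
          (by simp only [List.length_take]; omega), List.take_take,
          min_eq_left (by omega)]
      have hTseg : (T.drop lo).take (A - lo) = (buf.drop lo).take (A - lo) := by
        rw [hT, List.append_assoc, List.drop_append_of_le_length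
          (by simp only [List.length_take]; omega),
          List.take_append_of_le_length
          (by simp only [List.length_drop, List.length_take]; omega),
          List.drop_take, List.take_take, min_eq_left (by omega)]
      have hTdrop : T.drop A = List.replicate (B - A) ' ' ++ buf.drop B := by
        rw [hT, List.append_assoc, List.drop_append,
          List.drop_of_length_le (by simp only [List.length_take]; omega),
          List.nil_append,
          show A - (buf.take A).length = 0 by simp only [List.length_take]; omega,
          List.drop_zero]
      rw [hTtake, hTseg, hTdrop]
      obtain ⟨C1, hC1⟩ : ∃ C1, C1 = cantor ((buf.drop lo).take (A - lo)) := ⟨_, rfl⟩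
      rw [← hC1]
      have hC1len : C1.length = A - lo := by
        rw [hC1, cantor_length]
        simp only [List.length_take, List.length_drop]
        omega
      obtain ⟨X, hX⟩ :
          ∃ X, X = buf.take lo ++ C1 ++ (List.replicate (B - A) ' ' ++ buf.drop B) :=
        ⟨_, rfl⟩
      rw [← hX]
      have hX2 : X = (buf.take lo ++ C1 ++ List.replicate (B - A) ' ') ++ buf.drop B := by
        rw [hX, List.append_assoc, List.append_assoc, List.append_assoc]
      have hXpre : (buf.take lo ++ C1 ++ List.replicate (B - A) ' ').length = B := by
        simp only [List.length_append, List.length_take, List.length_replicate, hC1len]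
        omega
      rw [ih B hi X (by omega) (by rw [hX2]; simp only [List.length_append,
        List.length_take, List.length_replicate, List.length_drop, hC1len]; omega)
        (by omega)]
      have hXtake : X.take B = buf.take lo ++ C1 ++ List.replicate (B - A) ' ' := by
        have h := List.take_append_length
          (l₁ := buf.take lo ++ C1 ++ List.replicate (B - A) ' ') (l₂ := buf.drop B)
        rw [hXpre] at h
        rw [hX2, h]
      have hXdropB : X.drop B = buf.drop B := by
        have h := List.drop_append_length
          (l₁ := buf.take lo ++ C1 ++ List.replicate (B - A) ' ') (l₂ := buf.drop B)
        rw [hXpre] at h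
        rw [hX2, h]
      have hXdrophi : X.drop hi = buf.drop hi := by
        rw [hX2, List.drop_append, List.drop_of_length_le (by rw [hXpre]; omega),
          List.nil_append, hXpre, List.drop_drop,
          show B + (hi - B) = hi by omega]
      rw [hXtake, hXdropB, hXdrophi]
      have hseglen : ((buf.drop lo).take (hi - lo)).length = hi - lo := by
        simp only [List.length_take, List.length_drop]; omega
      have hunfold : cantor ((buf.drop lo).take (hi - lo)) =
          C1 ++ List.replicate (B - A) ' ' ++
          cantor ((buf.drop B).take (hi - B)) := by
        rw [cantor, if_neg (by rw [hseglen]; omega), hseglen]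
        rw [show 2 * (hi - lo) / 3 - (hi - lo) / 3 = B - A by omega]
        rw [List.drop_take, List.drop_drop]
        rw [show lo + 2 * (hi - lo) / 3 = B by omega]
        rw [show hi - lo - 2 * (hi - lo) / 3 = hi - B by omega]
        rw [List.take_take, min_eq_left (by omega)]
        rw [show (hi - lo) / 3 = A - lo by omega, ← hC1]
      rw [hunfold]
      simp [List.append_assoc]

-- ===== VERDICT (by name: the statement is the Claim_ definition above) =====
theorem mid_blank_spec : Claim_equal_mid_blank := by
  intro STRING _
  unfold Spec_mid_blank mid_blank mid_blank_alt
  rw [midA_eq_cantor _ _ le_rfl]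
  rw [show ((0 : Int)) = ((0 : Nat) : Int) by rfl,
      blankB_eq STRING.toList.length 0 STRING.toList.length STRING.toList
        (Nat.zero_le _) le_rfl (by omega)]
  rw [List.take_zero, List.drop_zero, Nat.sub_zero,
    List.take_of_length_le le_rfl, List.drop_of_length_le le_rfl,
    List.nil_append, List.append_nil]
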